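-- pv_equiv track=rewrite | github.com/Wyverst/pokemmo1 | breedingsimulator.py | determine_child_ivs
-- ===== SOURCE A (Python) =====
-- STATS = ["hp", "atk", "def", "spa", "spd", "spe"]
--
-- def determine_child_ivs(parent1_ivs, parent2_ivs, items):
--     child_ivs = [0] * 6
--     item1 = items[0]
--     item2 = items[1]
--
--     for i in range(6):
--         iv1 = parent1_ivs[i]
--         iv2 = parent2_ivs[i]
--
--         # Check if the corresponding brace is held by parents
--         if f"{STATS[i]}_brace" == item1:
--             child_ivs[i] = iv1
--         elif f"{STATS[i]}_brace" == item2: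
--             child_ivs[i] = iv2
--         else:
--             child_ivs[i] = 31 if (iv1 == 31 and iv2 == 31) else 0
--
--     return child_ivs
-- ===== SOURCE B (Python) =====
-- STATS = ["hp", "atk", "def", "spa", "spd", "spe"]
--
-- def determine_child_ivs(parent1_ivs, parent2_ivs, items):
--     braces = [stat + "_brace" for stat in STATS]
--     child = [31 if (parent1_ivs[i], parent2_ivs[i]) == (31, 31) else 0
--              for i in range(6)]
--     # apply overrides: item2 first, then item1 so item1 wins ties
--     for item, ivs in ((items[1], parent2_ivs), (items[0], parent1_ivs)):
--         if item in braces: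
--             i = braces.index(item)
--             child[i] = ivs[i]
--     return child
-- ===== Notes on version B (the rewrite author's own statement) =====
-- stated objective: alternative
-- what changed: Replaced the single loop that chooses each stat by per-stat string-equality branches with a default pass computing the 31/0 baseline plus a separate index-lookup override pass over the two held items (item2 applied first, then item1 so item1 wins ties).
import Mathlib
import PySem

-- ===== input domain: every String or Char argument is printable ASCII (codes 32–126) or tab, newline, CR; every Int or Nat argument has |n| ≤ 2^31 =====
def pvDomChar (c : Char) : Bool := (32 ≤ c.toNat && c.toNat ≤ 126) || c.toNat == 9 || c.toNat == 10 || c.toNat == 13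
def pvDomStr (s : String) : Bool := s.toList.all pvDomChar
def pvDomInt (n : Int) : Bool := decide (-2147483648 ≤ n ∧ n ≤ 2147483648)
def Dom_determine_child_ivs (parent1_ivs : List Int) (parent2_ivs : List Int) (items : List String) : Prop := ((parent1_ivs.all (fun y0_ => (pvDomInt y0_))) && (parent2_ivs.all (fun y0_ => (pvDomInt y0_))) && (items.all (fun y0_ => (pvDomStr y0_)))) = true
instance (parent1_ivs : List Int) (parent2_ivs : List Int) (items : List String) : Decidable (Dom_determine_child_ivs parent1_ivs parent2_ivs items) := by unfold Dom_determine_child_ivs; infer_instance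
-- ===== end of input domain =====

-- B replaces A's six per-stat string-comparison branches by a zip default pass plus an
-- index-lookup override pass (alternative decomposition, same asymptotic cost).

-- ===== PORT A =====
def pvStats : List String := ["hp", "atk", "def", "spa", "spd", "spe"]

def determine_child_ivs (parent1_ivs : List Int) (parent2_ivs : List Int) (items : List String) : List Int :=
  let child0 : List Int := List.replicate 6 0
  let item1 := (PySem.List.pyGet? items 0).getD ""
  let item2 := (PySem.List.pyGet? items 1).getD ""
  (PySem.List.pyRange 0 6 1).foldl (fun child i =>
    let iv1 := (PySem.List.pyGet? parent1_ivs i).getD 0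
    let iv2 := (PySem.List.pyGet? parent2_ivs i).getD 0
    let brace := ((PySem.List.pyGet? pvStats i).getD "") ++ "_brace"
    if brace == item1 then child.set i.toNat iv1
    else if brace == item2 then child.set i.toNat iv2
    else child.set i.toNat (if iv1 == 31 && iv2 == 31 then 31 else 0)) child0

-- ===== PORT B =====
def pvBraces : List String := pvStats.map (fun s => s ++ "_brace")

def pvOverride (child : List Int) (item : String) (ivs : List Int) : List Int :=
  match PySem.List.index? pvBraces item with
  | some i => child.set i ((PySem.List.pyGet? ivs (i : Int)).getD 0)
  | none => child

def determine_child_ivs_alt (parent1_ivs : List Int) (parent2_ivs : List Int) (items : List String) : List Int :=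
  let base := (PySem.List.pyRange 0 6 1).map (fun i =>
    if ((PySem.List.pyGet? parent1_ivs i).getD 0, (PySem.List.pyGet? parent2_ivs i).getD 0) == ((31 : Int), (31 : Int)) then (31 : Int) else 0)
  let c1 := pvOverride base ((PySem.List.pyGet? items 1).getD "") parent2_ivs
  pvOverride c1 ((PySem.List.pyGet? items 0).getD "") parent1_ivs

-- ===== PRECONDITION & SPEC =====
-- Pre_ excludes exactly the inputs on which A raises IndexError: fewer than 6 parent IVs
-- on either side or fewer than 2 items.
def Pre_determine_child_ivs (parent1_ivs : List Int) (parent2_ivs : List Int) (items : List String) : Prop :=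
  6 ≤ parent1_ivs.length ∧ 6 ≤ parent2_ivs.length ∧ 2 ≤ items.length
instance (parent1_ivs : List Int) (parent2_ivs : List Int) (items : List String) : Decidable (Pre_determine_child_ivs parent1_ivs parent2_ivs items) := by unfold Pre_determine_child_ivs; infer_instance

def pvWitness_determine_child_ivs : List Int × List Int × List String :=
  ([31, 31, 0, 5, 31, 0], [31, 0, 0, 7, 31, 31], ["atk_brace", "spe_brace"])

def Spec_determine_child_ivs (parent1_ivs : List Int) (parent2_ivs : List Int) (items : List String) (out : List Int) : Prop := out = determine_child_ivs_alt parent1_ivs parent2_ivs items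
instance (parent1_ivs : List Int) (parent2_ivs : List Int) (items : List String) (out : List Int) : Decidable (Spec_determine_child_ivs parent1_ivs parent2_ivs items out) := by unfold Spec_determine_child_ivs; infer_instance

-- ===== CLAIM (what is proved, stated in full; the proofs are below) =====
def Claim_equal_determine_child_ivs : Prop := ∀ (parent1_ivs : List Int) (parent2_ivs : List Int) (items : List String), Dom_determine_child_ivs parent1_ivs parent2_ivs items → Pre_determine_child_ivs parent1_ivs parent2_ivs items → Spec_determine_child_ivs parent1_ivs parent2_ivs items (determine_child_ivs parent1_ivs parent2_ivs items)

-- ===== LEMMAS AND PROOFS =====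

lemma brace_cases (s : String) :
    s = "hp_brace" ∨ s = "atk_brace" ∨ s = "def_brace" ∨ s = "spa_brace" ∨ s = "spd_brace" ∨ s = "spe_brace" ∨
    (List.idxOf? s pvBraces = none ∧ "hp_brace" ≠ s ∧ "atk_brace" ≠ s ∧ "def_brace" ≠ s ∧ "spa_brace" ≠ s ∧ "spd_brace" ≠ s ∧ "spe_brace" ≠ s) := by
  by_cases h : s ∈ pvBraces
  · simp [pvBraces, pvStats] at h
    tauto
  · refine Or.inr (Or.inr (Or.inr (Or.inr (Or.inr (Or.inr ⟨?_, ?_⟩)))))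
    · have hn := (PySem.List.index?_eq_none_iff pvBraces s).mpr h
      rwa [PySem.List.index?_eq_idxOf?] at hn
    · simp [pvBraces, pvStats] at h
      obtain ⟨x1, x2, x3, x4, x5, x6⟩ := h
      exact ⟨Ne.symm x1, Ne.symm x2, Ne.symm x3, Ne.symm x4, Ne.symm x5, Ne.symm x6⟩

lemma pyRange6 : PySem.List.pyRange 0 6 1 = [0, 1, 2, 3, 4, 5] := by decide

lemma idx_hp : List.idxOf? ("hp_brace" : String) pvBraces = some 0 := by decide
lemma idx_atk : List.idxOf? ("atk_brace" : String) pvBraces = some 1 := by decide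
lemma idx_def : List.idxOf? ("def_brace" : String) pvBraces = some 2 := by decide
lemma idx_spa : List.idxOf? ("spa_brace" : String) pvBraces = some 3 := by decide
lemma idx_spd : List.idxOf? ("spd_brace" : String) pvBraces = some 4 := by decide
lemma idx_spe : List.idxOf? ("spe_brace" : String) pvBraces = some 5 := by decide

-- ===== VERDICT (by name: the statement is the Claim_ definition above) =====
set_option maxHeartbeats 4000000 in
theorem determine_child_ivs_spec : Claim_equal_determine_child_ivs := by
  intro p1 p2 items _ hpre
  obtain ⟨h1, h2, h3⟩ := hpre
  match p1, p2, items, h1, h2, h3 with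
  | a0 :: a1 :: a2 :: a3 :: a4 :: a5 :: r1, b0 :: b1 :: b2 :: b3 :: b4 :: b5 :: r2,
      i0 :: i1 :: r3, _, _, _ =>
    unfold Spec_determine_child_ivs
    have e1 : ("hp" ++ "_brace" : String) = "hp_brace" := rfl
    have e2 : ("atk" ++ "_brace" : String) = "atk_brace" := rfl
    have e3 : ("def" ++ "_brace" : String) = "def_brace" := rfl
    have e4 : ("spa" ++ "_brace" : String) = "spa_brace" := rfl
    have e5 : ("spd" ++ "_brace" : String) = "spd_brace" := rfl
    have e6 : ("spe" ++ "_brace" : String) = "spe_brace" := rfl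
    rcases brace_cases i0 with h0 | h0 | h0 | h0 | h0 | h0 | ⟨hn0, e01, e02, e03, e04, e05, e06⟩ <;>
      rcases brace_cases i1 with hh1 | hh1 | hh1 | hh1 | hh1 | hh1 | ⟨hn1, e11, e12, e13, e14, e15, e16⟩ <;>
      subst_vars <;>
      simp [determine_child_ivs, determine_child_ivs_alt, pyRange6, pvOverride, pvStats,
        idx_hp, idx_atk, idx_def, idx_spa, idx_spd, idx_spe,
        PySem.List.pyGet?_of_nonneg, *]
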